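-- pv_equiv track=rewrite | github.com/DerekZuurmond/adventcode2023 | code/day1.py | find_full_out_num
-- ===== SOURCE A (Python) =====
-- def find_full_out_num(text) -> int:
--     """Find all the numbers in a given text, than return first and last.
--
--     for example  'hellthree1' will return 31
--     """
--     options_mapping = {
--         "one": 1,
--         "two": 2,
--         "three": 3,
--         "four": 4,
--         "five": 5,
--         "six": 6,
--         "seven": 7,
--         "eight": 8,
--         "nine": 9,
--     }
--     for i in range(1, 10):
--         options_mapping[str(i)] = i
--
--     text_indices = []
--     text_indices = []
--     for key in options_mapping.keys():
--         index = text.lower().find(key)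
--         while index != -1:
--             text_indices.append((key, index))
--             index = text.lower().find(key, index + 1)
--
--     first_num = options_mapping[min(text_indices, key=lambda x: x[1])[0]]
--     last_num = options_mapping[max(text_indices, key=lambda x: x[1])[0]]
--     return int(str(first_num) + str(last_num))
-- ===== SOURCE B (Python) =====
-- def find_full_out_num(text) -> int:
--     """Find all the numbers in a given text, than return first and last.
--
--     for example  'hellthree1' will return 31
--     """
--     keys = [("one", 1), ("two", 2), ("three", 3), ("four", 4), ("five", 5),
--             ("six", 6), ("seven", 7), ("eight", 8), ("nine", 9),
--             ("1", 1), ("2", 2), ("3", 3), ("4", 4), ("5", 5),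
--             ("6", 6), ("7", 7), ("8", 8), ("9", 9)]
--     rest = text.lower()
--     first = None
--     last = None
--     while rest:
--         hit = next((v for k, v in keys if rest.startswith(k)), None)
--         if hit is not None:
--             if first is None:
--                 first = hit
--             last = hit
--         rest = rest[1:]
--     if first is None:
--         raise ValueError("no number found in text")
--     return int(str(first) + str(last))
-- ===== Notes on version B (the rewrite author's own statement) =====
-- stated objective: faster
-- what changed: Instead of scanning the whole text once per key (recomputing text.lower() before every find call) and then taking min/max of all (key,index) pairs, B lowercases once and makes a single left-to-right pass over the suffixes, checking which key is a prefix at each position and keeping only the first and last matched value.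
import Mathlib
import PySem

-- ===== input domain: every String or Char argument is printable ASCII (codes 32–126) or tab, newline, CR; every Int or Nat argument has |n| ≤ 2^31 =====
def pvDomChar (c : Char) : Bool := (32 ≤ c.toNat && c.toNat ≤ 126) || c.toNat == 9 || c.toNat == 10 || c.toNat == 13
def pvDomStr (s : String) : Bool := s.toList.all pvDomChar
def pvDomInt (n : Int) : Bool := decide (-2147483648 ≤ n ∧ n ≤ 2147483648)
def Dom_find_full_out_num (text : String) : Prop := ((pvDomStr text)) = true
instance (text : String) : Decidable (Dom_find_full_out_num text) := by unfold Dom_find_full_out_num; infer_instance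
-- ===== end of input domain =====

-- B replaces A's per-key repeated find scans (each recomputing text.lower()) by a single
-- lowercase pass over the suffixes that keeps only the first and last matched value.

-- ===== PORT A =====
-- options_mapping = {"one": 1, …, "nine": 9}; for i in range(1, 10): options_mapping[str(i)] = i
def pvMappingA : PySem.Dict (List Char) Int :=
  (PySem.List.pyRange 1 10 1).foldl
    (fun d i => d.insert (PySem.Int.toChars i) i)
    (PySem.Dict.ofList
      [("one".toList, 1), ("two".toList, 2), ("three".toList, 3),
       ("four".toList, 4), ("five".toList, 5), ("six".toList, 6),
       ("seven".toList, 7), ("eight".toList, 8), ("nine".toList, 9)])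

-- 'while index != -1: text_indices.append((key, index)); index = text.lower().find(key, index + 1)'
-- (the fuel only makes the loop total; pvOccLoop_spec shows fuel low.length + 1 is never exhausted)
def pvOccLoop (low key : List Char) : Nat → Int → List (List Char × Int) → List (List Char × Int)
  | 0, _, acc => acc
  | fuel + 1, index, acc =>
    if index ≠ -1 then
      pvOccLoop low key fuel (PySem.Chars.findFrom low key (index + 1) none) (acc ++ [(key, index)])
    else acc

def find_full_out_num (text : String) : Int :=
  let low := PySem.Chars.lower text.toList      -- text.lower() (A's repeated calls all return this value)
  let textIndices := pvMappingA.keys.foldl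
    (fun acc key => pvOccLoop low key (low.length + 1) (PySem.Chars.find low key) acc) []
  match PySem.List.min? textIndices (fun x => x.2), PySem.List.max? textIndices (fun x => x.2) with
  | some mn, some mx =>
    let firstNum := pvMappingA.getD mn.1 0      -- options_mapping[…]: the key is always present here
    let lastNum := pvMappingA.getD mx.1 0
    (PySem.Int.ofChars? (PySem.Int.toChars firstNum ++ PySem.Int.toChars lastNum)).getD 0
      -- int(str(first_num) + str(last_num)); ofChars? is always `some` on two digit chars
  | _, _ => 0                                   -- Python: min([]) raises ValueError; outside Pre_

-- ===== PORT B =====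
def pvKeys : List (List Char × Int) :=
  [("one".toList, 1), ("two".toList, 2), ("three".toList, 3), ("four".toList, 4),
   ("five".toList, 5), ("six".toList, 6), ("seven".toList, 7), ("eight".toList, 8),
   ("nine".toList, 9),
   ("1".toList, 1), ("2".toList, 2), ("3".toList, 3), ("4".toList, 4), ("5".toList, 5),
   ("6".toList, 6), ("7".toList, 7), ("8".toList, 8), ("9".toList, 9)]

-- 'while rest: hit = next((v for k, v in keys if rest.startswith(k)), None); …; rest = rest[1:]'
def pvScan : List Char → Option Int × Option Int → Option Int × Option Int
  | [], st => st
  | c :: cs, (first, last) =>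
    match (pvKeys.find? (fun kv => PySem.Chars.startswith (c :: cs) kv.1)).map (·.2) with
    | some v => pvScan cs (some (first.getD v), some v)
    | none => pvScan cs (first, last)

def find_full_out_num_alt (text : String) : Int :=
  let st := pvScan (PySem.Chars.lower text.toList) (none, none)
  match st.1 with
  | none => 0                                   -- Python: raise ValueError; outside Pre_
  | some f =>
    match st.2 with
    | none => 0                                 -- unreachable: last is set whenever first is
    | some l => (PySem.Int.ofChars? (PySem.Int.toChars f ++ PySem.Int.toChars l)).getD 0

-- ===== PRECONDITION & SPEC =====
-- Pre_ excludes exactly the texts containing no digit 1-9 and no spelled number word: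
-- there A raises ValueError (min of the empty list) and B raises ValueError as well.
def Pre_find_full_out_num (text : String) : Prop :=
  pvKeys.any (fun kv => PySem.Chars.isIn kv.1 (PySem.Chars.lower text.toList)) = true
instance (text : String) : Decidable (Pre_find_full_out_num text) := by
  unfold Pre_find_full_out_num; infer_instance
def pvWitness_find_full_out_num : String := "hellthree1"

def Spec_find_full_out_num (text : String) (out : Int) : Prop := out = find_full_out_num_alt text
instance (text : String) (out : Int) : Decidable (Spec_find_full_out_num text out) := by
  unfold Spec_find_full_out_num; infer_instance

-- ===== CLAIM (what is proved, stated in full; the proofs are below) =====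
def Claim_equal_find_full_out_num : Prop := ∀ (text : String), Dom_find_full_out_num text → Pre_find_full_out_num text → Spec_find_full_out_num text (find_full_out_num text)

-- ===== LEMMAS AND PROOFS =====

def pvMAt (t : List Char) : Option (List Char × Int) :=
  pvKeys.find? (fun kv => PySem.Chars.startswith t kv.1)
lemma pvKeys_prefix_uniq : ∀ kv1 ∈ pvKeys, ∀ kv2 ∈ pvKeys, kv1.1 <+: kv2.1 → kv1 = kv2 := by decide

lemma pvMAt_eq_some_iff (t : List Char) (kv : List Char × Int) :
    pvMAt t = some kv ↔ kv ∈ pvKeys ∧ kv.1 <+: t := by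
  constructor
  · intro h
    have hm := List.mem_of_find?_eq_some h
    have hp := List.find?_some h
    rw [PySem.Chars.startswith_iff] at hp
    exact ⟨hm, hp⟩
  · rintro ⟨hm, hp⟩
    cases h : pvMAt t with
    | none =>
      rw [pvMAt, List.find?_eq_none] at h
      exact absurd ((PySem.Chars.startswith_iff _ _).2 hp) (h kv hm)
    | some kv' =>
      rw [pvMAt] at h
      have hm' := List.mem_of_find?_eq_some h
      have hp'0 := List.find?_some h
      rw [PySem.Chars.startswith_iff] at hp'0
      have hp' := hp'0
      rcases List.prefix_or_prefix_of_prefix hp' hp with h12 | h21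
      · exact congrArg some (pvKeys_prefix_uniq kv' hm' kv hm h12)
      · exact congrArg some (pvKeys_prefix_uniq kv hm kv' hm' h21).symm

lemma pvMAt_isSome_iff (t : List Char) :
    (pvMAt t).isSome = true ↔ ∃ kv ∈ pvKeys, kv.1 <+: t := by
  rw [Option.isSome_iff_exists]
  constructor
  · rintro ⟨kv, h⟩; exact ⟨kv, ((pvMAt_eq_some_iff t kv).1 h)⟩
  · rintro ⟨kv, h1, h2⟩; exact ⟨kv, (pvMAt_eq_some_iff t kv).2 ⟨h1, h2⟩⟩

def pvJ (low : List Char) : List Nat :=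
  (List.range low.length).filter (fun j => (pvMAt (low.drop j)).isSome)
def pvVal (low : List Char) (j : Nat) : Int := ((pvMAt (low.drop j)).map (·.2)).getD 0
def pvV : List Char → List Int
  | [] => []
  | c :: cs =>
    match pvMAt (c :: cs) with
    | some kv => kv.2 :: pvV cs
    | none => pvV cs

lemma pvV_eq_map (cs : List Char) : pvV cs = (pvJ cs).map (pvVal cs) := by
  induction cs with
  | nil => rfl
  | cons c cs ih =>
    have h2 : (pvVal (c :: cs) ∘ Nat.succ) = pvVal cs := by
      funext j; simp [pvVal, Function.comp, List.drop_succ_cons]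
    have h3 : ((fun j => (pvMAt (List.drop j (c :: cs))).isSome) ∘ Nat.succ)
        = (fun j => (pvMAt (List.drop j cs)).isSome) := by
      funext j; simp [Function.comp, List.drop_succ_cons]
    simp only [pvJ, List.length_cons, List.range_succ_eq_map, List.filter_cons,
      List.filter_map, List.drop_zero, h3]
    cases h : pvMAt (c :: cs) with
    | some kv =>
      simp only [pvV, h, Option.isSome_some, if_pos, List.map_cons, List.map_map, h2]
      refine List.cons_eq_cons.mpr ⟨by simp [pvVal, h], ?_⟩
      rw [ih]; rfl
    | none =>
      simp only [pvV, h, Option.isSome_none, Bool.false_eq_true, if_neg, not_false_iff,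
        List.map_map, h2]
      rw [ih]; rfl

lemma pvScan_eq (cs : List Char) : ∀ f l : Option Int,
    pvScan cs (f, l) = (if f.isSome then f else (pvV cs).head?, ((pvV cs).getLast?).or l) := by
  induction cs with
  | nil => intro f l; cases f <;> simp [pvScan, pvV]
  | cons c cs ih =>
    intro f l
    show (match (pvMAt (c :: cs)).map (·.2) with
      | some v => pvScan cs (some (f.getD v), some v)
      | none => pvScan cs (f, l)) = _
    cases h : pvMAt (c :: cs) with
    | some kv =>
      simp only [Option.map_some]
      rw [ih]
      simp only [pvV, h]
      refine Prod.ext ?_ ?_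
      · cases f <;> simp
      · cases hv : pvV cs with
        | nil => simp
        | cons v vs =>
          simp only [List.getLast?_cons_cons]
          cases hlast : (v :: vs).getLast? <;> simp_all
    | none =>
      simp only [Option.map_none]
      rw [ih]
      simp only [pvV, h]

lemma pv_filter_range_split (p : Nat → Bool) (n r start : Nat) (hrn : r < n) (hpr : p r = true)
    (hsr : start ≤ r) (hmin : ∀ j, start ≤ j → j < r → p j = false) :
    (List.range n).filter (fun j => decide (start ≤ j) && p j)
      = r :: (List.range n).filter (fun j => decide (r + 1 ≤ j) && p j) := by
  have hn : n = (r + 1) + (n - (r + 1)) := by omega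
  rw [hn, List.range_add, List.filter_append, List.filter_append]
  have h1 : (List.range (r + 1)).filter (fun j => decide (start ≤ j) && p j) = [r] := by
    rw [List.range_succ, List.filter_append, List.filter_eq_nil_iff.mpr, List.nil_append]
    · simp [hsr, hpr]
    · intro a ha
      rw [List.mem_range] at ha
      by_cases hs : start ≤ a
      · simp [hmin a hs ha]
      · simp [hs]
  have h2 : (List.range (r + 1)).filter (fun j => decide (r + 1 ≤ j) && p j) = [] := by
    apply List.filter_eq_nil_iff.mpr
    intro a ha
    rw [List.mem_range] at ha
    simp [Nat.not_le.mpr ha]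
  have h3 : ((List.range (n - (r + 1))).map (fun x => (r + 1) + x)).filter
        (fun j => decide (start ≤ j) && p j)
      = ((List.range (n - (r + 1))).map (fun x => (r + 1) + x)).filter
        (fun j => decide (r + 1 ≤ j) && p j) := by
    apply List.filter_congr
    intro a ha
    rw [List.mem_map] at ha
    obtain ⟨x, _, rfl⟩ := ha
    have : start ≤ r + 1 + x := by omega
    simp [this]
  rw [h1, h2, h3, List.nil_append]
  rfl

lemma pvOccLoop_spec (low key : List Char) (hk : key ≠ []) :
    ∀ (fuel start : Nat), start ≤ low.length → low.length + 1 - start ≤ fuel →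
    ∀ acc, pvOccLoop low key fuel (PySem.Chars.findFrom low key (start : Int) none) acc
      = acc ++ ((List.range low.length).filter
          (fun j => decide (start ≤ j) && decide (key <+: low.drop j))).map
          (fun j : Nat => (key, (j : Int))) := by
  intro fuel
  induction fuel with
  | zero => intro start hs hf; omega
  | succ fuel ih =>
    intro start hs hf acc
    by_cases hneg : PySem.Chars.findFrom low key (start : Int) none = -1
    · -- no further occurrence: the filter is empty
      have hnone : ∀ j, start ≤ j → ¬ key <+: low.drop j := by
        intro j hj hpre
        have hinf : key <:+: low.drop start := by
          have : low.drop j = (low.drop start).drop (j - start) := by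
            rw [List.drop_drop]; congr 1; omega
          rw [this] at hpre
          exact hpre.isInfix.trans (List.drop_suffix _ _).isInfix
        exact ((PySem.Chars.findFrom_natCast_eq_neg_one_iff low key start hs).1 hneg) hinf
      have hfil : ((List.range low.length).filter
          (fun j => decide (start ≤ j) && decide (key <+: low.drop j))) = [] := by
        apply List.filter_eq_nil_iff.mpr
        intro a _
        by_cases hsa : start ≤ a
        · simp [hnone a hsa]
        · simp [hsa]
      rw [hfil, hneg]
      simp [pvOccLoop]
    · -- an occurrence r was found
      set r := PySem.Chars.findFrom low key (start : Int) none with hr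
      obtain ⟨h1, h2, h3⟩ := PySem.Chars.findFrom_natCast_spec low key start hs hneg
      have hr0 : 0 ≤ r := le_trans (Int.natCast_nonneg start) h1
      have hrlen : r.toNat < low.length := by
        have hlen := h2.length_le
        rw [List.length_drop] at hlen
        have : 0 < key.length := List.length_pos_iff.mpr hk
        omega
      have hrs : start ≤ r.toNat := by omega
      rw [pvOccLoop, if_pos hneg]
      have hcast : r + 1 = ((r.toNat + 1 : Nat) : Int) := by omega
      rw [hcast, ih (r.toNat + 1) (by omega) (by omega)]
      rw [pv_filter_range_split (fun j => decide (key <+: low.drop j)) low.length r.toNat start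
          hrlen (by simpa using h2) hrs (by intro j hj1 hj2; simpa using h3 j hj1 hj2)]
      have hrr : (r : Int) = ((r.toNat : Nat) : Int) := by omega
      rw [List.map_cons, ← hrr]
      simp

lemma pvKeys_ne_nil : ∀ kv ∈ pvKeys, kv.1 ≠ [] := by decide
lemma pvMappingA_keys : pvMappingA.keys = pvKeys.map Prod.fst := by decide
lemma pvMappingA_lookup : ∀ kv ∈ pvKeys, pvMappingA.getD kv.1 0 = kv.2 := by decide

def pvOcc (low key : List Char) : List Nat :=
  (List.range low.length).filter (fun j => decide (key <+: low.drop j))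

lemma pvTextIndices_eq (low : List Char) :
    pvMappingA.keys.foldl
      (fun acc key => pvOccLoop low key (low.length + 1) (PySem.Chars.find low key) acc) []
    = pvKeys.flatMap (fun kv => (pvOcc low kv.1).map (fun j : Nat => (kv.1, (j : Int)))) := by
  rw [pvMappingA_keys, List.foldl_map]
  have hcong : List.foldl
      (fun acc kv => pvOccLoop low (Prod.fst kv) (low.length + 1)
        (PySem.Chars.find low (Prod.fst kv)) acc) [] pvKeys
    = List.foldl
      (fun acc kv => acc ++ (pvOcc low kv.1).map (fun j : Nat => (kv.1, (j : Int)))) [] pvKeys := by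
    apply PySem.List.foldl_congr_mem
    intro acc kv hkv
    have h0 : PySem.Chars.find low kv.1 = PySem.Chars.findFrom low kv.1 ((0 : Nat) : Int) none := by
      rw [Nat.cast_zero, PySem.Chars.findFrom_zero]
    rw [h0, pvOccLoop_spec low kv.1 (pvKeys_ne_nil kv hkv) (low.length + 1) 0
      (Nat.zero_le _) (by omega) acc]
    simp [pvOcc]
  rw [hcong, PySem.List.foldl_append_eq_flatMap, List.nil_append]

lemma pv_mem_textIndices (low : List Char) (p : List Char × Int) :
    p ∈ pvKeys.flatMap (fun kv => (pvOcc low kv.1).map (fun j : Nat => (kv.1, (j : Int)))) ↔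
    ∃ kv ∈ pvKeys, ∃ j < low.length, p = (kv.1, (j : Int)) ∧ kv.1 <+: low.drop j := by
  simp only [List.mem_flatMap, List.mem_map, pvOcc, List.mem_filter, List.mem_range,
    decide_eq_true_eq]
  constructor
  · rintro ⟨kv, hkv, j, ⟨hj, hpre⟩, rfl⟩
    exact ⟨kv, hkv, j, hj, rfl, hpre⟩
  · rintro ⟨kv, hkv, j, hj, rfl, hpre⟩
    exact ⟨kv, hkv, j, ⟨hj, hpre⟩, rfl⟩

lemma pv_head_min {l : List Nat} (h : l.Pairwise (· < ·)) (j0 : Nat) (rest : List Nat)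
    (he : l = j0 :: rest) : ∀ x ∈ l, j0 ≤ x := by
  subst he
  intro x hx
  rcases List.mem_cons.mp hx with rfl | hx
  · exact le_refl _
  · exact (List.pairwise_cons.mp h).1 x hx |>.le

lemma pv_getLast_max {l : List Nat} (h : l.Pairwise (· < ·)) (hne : l ≠ []) :
    ∀ x ∈ l, x ≤ l.getLast hne := by
  induction l with
  | nil => exact absurd rfl hne
  | cons a t ih =>
    intro x hx
    cases t with
    | nil => simp_all
    | cons b t' =>
      rcases List.mem_cons.mp hx with rfl | hx
      · have := (List.pairwise_cons.mp h).1
        have hlast := List.getLast_mem (l := b :: t') (by simp)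
        rw [List.getLast_cons (by simp)]
        exact (this _ hlast).le
      · rw [List.getLast_cons (by simp)]
        exact ih (List.pairwise_cons.mp h).2 (by simp) x hx

lemma pv_mem_pvJ (low : List Char) (j : Nat) :
    j ∈ pvJ low ↔ j < low.length ∧ (pvMAt (low.drop j)).isSome = true := by
  simp [pvJ, List.mem_filter, List.mem_range]

lemma pv_main (text : String) (hpre : Pre_find_full_out_num text) :
    find_full_out_num text = find_full_out_num_alt text := by
  set low := PySem.Chars.lower text.toList with hlow
  -- the list of matched positions is nonempty
  have hJne : pvJ low ≠ [] := by
    rw [Pre_find_full_out_num, List.any_eq_true] at hpre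
    obtain ⟨kv, hkv, hisin⟩ := hpre
    obtain ⟨j, hj⟩ := (PySem.Chars.exists_prefix_drop_iff_isIn kv.1 low).2 (by simpa using hisin)
    have hjn : j < low.length := by
      by_contra hge
      rw [List.drop_eq_nil_of_le (by omega)] at hj
      exact pvKeys_ne_nil kv hkv (List.prefix_nil.mp hj)
    have : j ∈ pvJ low := (pv_mem_pvJ low j).2
      ⟨hjn, (pvMAt_isSome_iff _).2 ⟨kv, hkv, hj⟩⟩
    intro hnil; rw [hnil] at this; exact List.not_mem_nil this
  have hJp : (pvJ low).Pairwise (· < ·) := List.Pairwise.filter _ List.pairwise_lt_range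
  obtain ⟨j0, rest, hJ⟩ : ∃ j0 rest, pvJ low = j0 :: rest := by
    cases hJ : pvJ low with
    | nil => exact absurd hJ hJne
    | cons a t => exact ⟨a, t, rfl⟩
  set jL := (pvJ low).getLast hJne with hjL
  have hj0mem : j0 ∈ pvJ low := by rw [hJ]; exact List.mem_cons_self
  have hjLmem : jL ∈ pvJ low := List.getLast_mem hJne
  obtain ⟨kv0, hkv0⟩ := Option.isSome_iff_exists.mp ((pv_mem_pvJ low j0).1 hj0mem).2
  obtain ⟨kvL, hkvL⟩ := Option.isSome_iff_exists.mp ((pv_mem_pvJ low jL).1 hjLmem).2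
  have hkv0' := (pvMAt_eq_some_iff _ _).1 hkv0
  have hkvL' := (pvMAt_eq_some_iff _ _).1 hkvL
  -- B's result
  have hB : find_full_out_num_alt text
      = (PySem.Int.ofChars? (PySem.Int.toChars kv0.2 ++ PySem.Int.toChars kvL.2)).getD 0 := by
    rw [find_full_out_num_alt, ← hlow, pvScan_eq]
    have hV : pvV low = (pvJ low).map (pvVal low) := pvV_eq_map low
    have hhead : (pvV low).head? = some (pvVal low j0) := by
      rw [hV, hJ]; rfl
    have hlast : (pvV low).getLast? = some (pvVal low jL) := by
      rw [hV, List.getLast?_map, List.getLast?_eq_some_getLast (h := hJne)]; rfl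
    rw [hhead, hlast]
    simp only [Option.isSome_none, Bool.false_eq_true, Option.or, pvVal,
      hkv0, hkvL, Option.map_some, Option.getD_some]
    rfl
  -- A's result
  set TI := pvKeys.flatMap (fun kv => (pvOcc low kv.1).map (fun j : Nat => (kv.1, (j : Int))))
    with hTI
  have hj0TI : (kv0.1, (j0 : Int)) ∈ TI := by
    rw [hTI, pv_mem_textIndices]
    exact ⟨kv0, hkv0'.1, j0, ((pv_mem_pvJ low j0).1 hj0mem).1, rfl, hkv0'.2⟩
  have hjLTI : (kvL.1, (jL : Int)) ∈ TI := by
    rw [hTI, pv_mem_textIndices]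
    exact ⟨kvL, hkvL'.1, jL, ((pv_mem_pvJ low jL).1 hjLmem).1, rfl, hkvL'.2⟩
  have hTIne : TI ≠ [] := by
    intro h; rw [h] at hj0TI; exact List.not_mem_nil hj0TI
  obtain ⟨mn, hmn⟩ : ∃ mn, PySem.List.min? TI (fun x => x.2) = some mn := by
    cases h : PySem.List.min? TI (fun x => x.2) with
    | none => exact absurd ((PySem.List.min?_eq_none_iff _ _).1 h) hTIne
    | some m => exact ⟨m, rfl⟩
  obtain ⟨mx, hmx⟩ : ∃ mx, PySem.List.max? TI (fun x => x.2) = some mx := by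
    cases h : PySem.List.max? TI (fun x => x.2) with
    | none => exact absurd ((PySem.List.max?_eq_none_iff _ _).1 h) hTIne
    | some m => exact ⟨m, rfl⟩
  -- the minimum is at position j0 and carries key kv0
  have hmn_eq : mn = (kv0.1, (j0 : Int)) := by
    obtain ⟨kv, hkv, j, hjn, hmneq, hpre'⟩ := (pv_mem_textIndices low mn).1
      (hTI ▸ PySem.List.min?_mem hmn)
    have hjJ : j ∈ pvJ low := (pv_mem_pvJ low j).2 ⟨hjn, (pvMAt_isSome_iff _).2 ⟨kv, hkv, hpre'⟩⟩
    have h1 : j0 ≤ j := pv_head_min hJp j0 rest hJ j hjJ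
    have h2 : mn.2 ≤ (j0 : Int) := PySem.List.min?_isMin hmn _ hj0TI
    have hj : j = j0 := by rw [hmneq] at h2; simp at h2; omega
    subst hj
    have : pvMAt (low.drop j) = some kv := (pvMAt_eq_some_iff _ _).2 ⟨hkv, hpre'⟩
    rw [hkv0] at this
    rw [hmneq, Option.some_inj.mp this]
  have hmx_eq : mx = (kvL.1, (jL : Int)) := by
    obtain ⟨kv, hkv, j, hjn, hmxeq, hpre'⟩ := (pv_mem_textIndices low mx).1
      (hTI ▸ PySem.List.max?_mem hmx)
    have hjJ : j ∈ pvJ low := (pv_mem_pvJ low j).2 ⟨hjn, (pvMAt_isSome_iff _).2 ⟨kv, hkv, hpre'⟩⟩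
    have h1 : j ≤ jL := pv_getLast_max hJp hJne j hjJ
    have h2 : (jL : Int) ≤ mx.2 := PySem.List.max?_isMax hmx _ hjLTI
    have hj : j = jL := by rw [hmxeq] at h2; simp at h2; omega
    rw [hj] at hpre' hmxeq
    have : pvMAt (low.drop jL) = some kv := (pvMAt_eq_some_iff _ _).2 ⟨hkv, hpre'⟩
    rw [hkvL] at this
    rw [hmxeq, Option.some_inj.mp this]
  -- assemble A
  rw [find_full_out_num]
  rw [← hlow]
  rw [pvTextIndices_eq low, ← hTI, hmn, hmx]
  simp only [hmn_eq, hmx_eq]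
  rw [hB]
  rw [pvMappingA_lookup kv0 hkv0'.1, pvMappingA_lookup kvL hkvL'.1]

-- ===== VERDICT (by name: the statement is the Claim_ definition above) =====
theorem find_full_out_num_spec : Claim_equal_find_full_out_num := by
  intro text _ hpre
  exact pv_main text hpre
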